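-- pv_equiv track=rewrite | github.com/RachelWealth/Process_mining | ex2.py | dependency_graph_inline
-- ===== SOURCE A (Python) =====
-- def dependency_graph_inline(log):
--     dg = {}
--     for case in log.keys():
--         events = list(log[case].keys())
--         for i in range(len(events)):
--             ei = events[i]
--
--             if ei not in dg.keys():
--                 dg[ei] = {}
--             if i == len(events) - 1:
--                 continue
--             ej = events[i + 1]
--             if ei == ej:
--                 continue
--             if ej not in dg[ei].keys():
--                 dg[ei][ej] = 1
--             else:
--                 dg[ei][ej] += 1
--     return dg
-- ===== SOURCE B (Python) =====
-- def dependency_graph_inline(log):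
--     case_events = [list(events) for events in log.values()]
--     dg = {e: {} for events in case_events for e in events}
--     pairs = [(a, b)
--              for events in case_events
--              for a, b in zip(events, events[1:])
--              if a != b]
--     counts = {}
--     for p in pairs:
--         counts[p] = counts.get(p, 0) + 1
--     for (a, b), c in counts.items():
--         dg[a][b] = c
--     return dg
-- ===== Notes on version B (the rewrite author's own statement) =====
-- stated objective: idiomatic
-- what changed: Replaces the single interleaved register-and-increment pass over indexed events with a three-phase decomposition: register every event as an empty-dict key via a comprehension, count all non-self consecutive pairs with a hand-rolled counter over a flattened pair list, then assemble dg[a][b] = count per distinct pair.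
import Mathlib
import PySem

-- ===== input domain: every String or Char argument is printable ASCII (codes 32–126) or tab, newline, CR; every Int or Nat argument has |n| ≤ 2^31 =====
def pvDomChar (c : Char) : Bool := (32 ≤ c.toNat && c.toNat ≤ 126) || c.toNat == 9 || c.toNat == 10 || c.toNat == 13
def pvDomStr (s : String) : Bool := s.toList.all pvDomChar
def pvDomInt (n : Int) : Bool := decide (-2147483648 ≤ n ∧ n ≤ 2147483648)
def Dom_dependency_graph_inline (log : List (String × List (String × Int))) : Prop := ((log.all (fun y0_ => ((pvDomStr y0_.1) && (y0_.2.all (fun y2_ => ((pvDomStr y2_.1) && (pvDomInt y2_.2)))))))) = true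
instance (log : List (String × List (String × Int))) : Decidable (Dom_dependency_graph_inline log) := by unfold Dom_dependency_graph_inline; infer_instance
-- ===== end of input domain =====

-- B replaces A's single interleaved register-and-increment pass with a register / count / assemble
-- three-phase decomposition (objective: idiomatic; same asymptotic cost; return value only).

-- ===== PORT A =====
-- 'if ei not in dg.keys(): dg[ei] = {}'
def pvReg (dg : PySem.Dict String (PySem.Dict String Int)) (e : String) :
    PySem.Dict String (PySem.Dict String Int) :=
  if dg.contains e then dg else dg.insert e PySem.Dict.empty

-- 'if ej not in dg[ei].keys(): dg[ei][ej] = 1 else: dg[ei][ej] += 1'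
-- (ei is always a key of dg here, so the in-place mutation keeps its position = Dict.insert)
def pvBump (dg : PySem.Dict String (PySem.Dict String Int)) (a b : String) :
    PySem.Dict String (PySem.Dict String Int) :=
  let inner := dg.getD a PySem.Dict.empty
  if inner.contains b then dg.insert a (inner.insert b (inner.getD b 0 + 1))
  else dg.insert a (inner.insert b 1)

-- the inner loop 'for i in range(len(events))' with reads events[i], events[i+1] and the
-- 'i == len(events)-1: continue' guard, rendered as the obvious structural recursion
def pvLoopA (dg : PySem.Dict String (PySem.Dict String Int)) :
    List String → PySem.Dict String (PySem.Dict String Int)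
  | [] => dg
  | [e] => pvReg dg e
  | e1 :: e2 :: rest =>
      let dg1 := pvReg dg e1
      let dg2 := if e1 == e2 then dg1 else pvBump dg1 e1 e2
      pvLoopA dg2 (e2 :: rest)

def dependency_graph_inline (log : List (String × List (String × Int))) :
    List (String × List (String × Int)) :=
  let logd := PySem.Dict.ofList log
  -- 'for case in log.keys(): events = list(log[case].keys())' (log[case] never raises: case ∈ keys)
  let dg := logd.keys.foldl
    (fun dg c => pvLoopA dg (PySem.Dict.ofList (logd.getD c [])).keys) PySem.Dict.empty
  dg.items.map (fun p => (p.1, p.2.items))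

-- ===== PORT B =====
def dependency_graph_inline_alt (log : List (String × List (String × Int))) :
    List (String × List (String × Int)) :=
  -- case_events = [list(events) for events in log.values()]
  let caseEvents := (PySem.Dict.ofList log).values.map (fun v => (PySem.Dict.ofList v).keys)
  -- dg = {e: {} for events in case_events for e in events}
  let dg0 : PySem.Dict String (PySem.Dict String Int) :=
    (caseEvents.flatMap (fun evs => evs)).foldl
      (fun d e => d.insert e PySem.Dict.empty) PySem.Dict.empty
  -- pairs = [(a, b) for events in case_events for a, b in zip(events, events[1:]) if a != b]
  let pairs := caseEvents.flatMap (fun evs => (evs.zip evs.tail).filter (fun p => !(p.1 == p.2)))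
  -- counts[p] = counts.get(p, 0) + 1
  let counts : PySem.Dict (String × String) Int :=
    pairs.foldl (fun d p => d.insert p (d.getD p 0 + 1)) PySem.Dict.empty
  -- for (a, b), c in counts.items(): dg[a][b] = c  (a is always a key of dg0, mutation keeps its position)
  let dg := counts.items.foldl
    (fun dg pc => dg.insert pc.1.1 ((dg.getD pc.1.1 PySem.Dict.empty).insert pc.1.2 pc.2)) dg0
  dg.items.map (fun p => (p.1, p.2.items))

-- ===== PRECONDITION & SPEC =====
def Spec_dependency_graph_inline (log : List (String × List (String × Int))) (out : List (String × List (String × Int))) : Prop := out = dependency_graph_inline_alt log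
instance (log : List (String × List (String × Int))) (out : List (String × List (String × Int))) : Decidable (Spec_dependency_graph_inline log out) := by unfold Spec_dependency_graph_inline; infer_instance

-- ===== CLAIM (what is proved, stated in full; the proofs are below) =====
def Claim_equal_dependency_graph_inline : Prop := ∀ (log : List (String × List (String × Int))), Dom_dependency_graph_inline log → Spec_dependency_graph_inline log (dependency_graph_inline log)

-- ===== LEMMAS AND PROOFS =====

-- consecutive non-equal pairs of an event list
def pvPairsOf (evs : List String) : List (String × String) :=
  (evs.zip evs.tail).filter (fun p => !(p.1 == p.2))

-- the inner dict a ends up with, given the distinct-pair list D and a count function c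
def pvInner (D : List (String × String)) (c : String × String → Int) (a : String) :
    PySem.Dict String Int :=
  PySem.Dict.mk ((D.filter (fun p => p.1 == a)).map (fun p => (p.2, c p)))

-- normal form of the graph under construction
def pvNF (E : List String) (D : List (String × String)) (c : String × String → Int) :
    PySem.Dict String (PySem.Dict String Int) :=
  PySem.Dict.mk ((PySem.Set.ofList E).map (fun a => (a, pvInner D c a)))

lemma pvNF_keys (E : List String) (D : List (String × String)) (c : String × String → Int) :
    (pvNF E D c).keys = PySem.Set.ofList E := by
  simp [pvNF, PySem.Dict.keys_mk, List.map_map, Function.comp_def]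

lemma pvNF_keys_nodup (E : List String) (D : List (String × String)) (c : String × String → Int) :
    (pvNF E D c).keys.Nodup := by
  rw [pvNF_keys]; exact PySem.Set.nodup_ofList E

lemma pvReg_nf (E : List String) (D : List (String × String)) (c : String × String → Int)
    (e : String) (hD : ∀ p ∈ D, p.1 ∈ E) :
    pvReg (pvNF E D c) e = pvNF (E ++ [e]) D c := by
  have hiff := PySem.Dict.contains_iff_mem_keys (pvNF E D c) e
  rw [pvNF_keys, PySem.Set.mem_ofList] at hiff
  by_cases hmem : e ∈ E
  · have hsnoc : PySem.Set.ofList (E ++ [e]) = PySem.Set.ofList E := by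
      rw [PySem.Set.ofList_append, PySem.Set.update_cons, PySem.Set.update_nil]
      simp [PySem.Set.add, PySem.Set.contains, (PySem.Set.mem_ofList E e).mpr hmem]
    simp [pvReg, hmem, pvNF, hsnoc]
  · have hcf : (pvNF E D c).contains e = false :=
      Bool.eq_false_iff.mpr (fun h => hmem (hiff.mp h))
    have hsnoc : PySem.Set.ofList (E ++ [e]) = PySem.Set.ofList E ++ [e] := by
      rw [PySem.Set.ofList_append, PySem.Set.update_cons, PySem.Set.update_nil]
      have hne : ¬ e ∈ PySem.Set.ofList E := fun h => hmem ((PySem.Set.mem_ofList E e).mp h)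
      simp [PySem.Set.add, PySem.Set.contains, hne]
    have hinner : pvInner D c e = PySem.Dict.empty := by
      have hfil : D.filter (fun p => p.1 == e) = [] := by
        rw [List.filter_eq_nil_iff]
        intro p hp
        simp only [beq_iff_eq]
        exact fun h => hmem (h ▸ hD p hp)
      simp [pvInner, hfil]
      rfl
    have hstep : pvReg (pvNF E D c) e = (pvNF E D c).insert e PySem.Dict.empty := by
      simp [pvReg, hcf]
    rw [hstep]
    apply PySem.Dict.ext
    rw [PySem.Dict.items_insert_of_not_contains _ _ hcf]
    simp [pvNF, hsnoc, hinner]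

-- membership of E in the normal form's key list
lemma pvNF_contains (E : List String) (D : List (String × String)) (c : String × String → Int)
    (a : String) : (pvNF E D c).contains a = true ↔ a ∈ E := by
  rw [PySem.Dict.contains_iff_mem_keys, pvNF_keys, PySem.Set.mem_ofList]

lemma pvNF_getD (E : List String) (D : List (String × String)) (c : String × String → Int)
    (a : String) (ha : a ∈ E) : (pvNF E D c).getD a PySem.Dict.empty = pvInner D c a := by
  apply PySem.Dict.getD_of_mem_items _ _ (pvNF_keys_nodup E D c)
  simp only [pvNF]
  exact List.mem_map.mpr ⟨a, (PySem.Set.mem_ofList E a).mpr ha, rfl⟩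

lemma pvInner_contains (D : List (String × String)) (c : String × String → Int) (a b : String) :
    (pvInner D c a).contains b = true ↔ (a, b) ∈ D := by
  simp only [pvInner, PySem.Dict.contains_mk, List.any_eq_true, List.mem_map, List.mem_filter]
  constructor
  · rintro ⟨q, ⟨p, ⟨hpD, hpa⟩, rfl⟩, hb⟩
    simp only [beq_iff_eq] at hpa hb
    have : p = (a, b) := by
      cases p; simp_all
    exact this ▸ hpD
  · intro h
    exact ⟨((a, b).2, c (a, b)), ⟨(a, b), ⟨h, by simp⟩, rfl⟩, by simp⟩

lemma pvInner_keys_nodup (D : List (String × String)) (c : String × String → Int) (a : String)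
    (hD : D.Nodup) : (pvInner D c a).keys.Nodup := by
  simp only [pvInner, PySem.Dict.keys_mk, List.map_map]
  have : ((D.filter (fun p => p.1 == a)).map ((fun x => x.1) ∘ fun p => (p.2, c p)))
      = (D.filter (fun p => p.1 == a)).map (fun p => p.2) := by
    simp [Function.comp_def]
  rw [this]
  apply List.Nodup.map_on _ (hD.filter _)
  intro x hx y hy hxy
  have hxa := (List.mem_filter.mp hx).2
  have hya := (List.mem_filter.mp hy).2
  simp only [beq_iff_eq] at hxa hya
  cases x; cases y; simp_all

lemma pvInner_getD (D : List (String × String)) (c : String × String → Int) (a b : String)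
    (hD : D.Nodup) (hab : (a, b) ∈ D) : (pvInner D c a).getD b 0 = c (a, b) := by
  apply PySem.Dict.getD_of_mem_items _ _ (pvInner_keys_nodup D c a hD)
  simp only [pvInner]
  exact List.mem_map.mpr ⟨(a, b), List.mem_filter.mpr ⟨hab, by simp⟩, rfl⟩

-- inserting at a key a ∈ E replaces a's entry in place
lemma pvNF_insert (E : List String) (D : List (String × String)) (c : String × String → Int)
    (a : String) (ha : a ∈ E) (v : PySem.Dict String Int) :
    (pvNF E D c).insert a v
      = PySem.Dict.mk ((PySem.Set.ofList E).map
          (fun a' => if a' = a then (a, v) else (a', pvInner D c a'))) := by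
  apply PySem.Dict.ext
  rw [PySem.Dict.items_insert_of_contains _ _ ((pvNF_contains E D c a).mpr ha)]
  simp only [pvNF, List.map_map]
  apply List.map_congr_left
  intro a' _
  by_cases h : a' = a <;> simp [h]

lemma pvSet_snoc_mem {α : Type} [BEq α] [LawfulBEq α] (l : List α) (x : α) (h : x ∈ l) :
    PySem.Set.ofList (l ++ [x]) = PySem.Set.ofList l := by
  rw [PySem.Set.ofList_append, PySem.Set.update_cons, PySem.Set.update_nil]
  simp [PySem.Set.add, PySem.Set.contains, (PySem.Set.mem_ofList l x).mpr h]

lemma pvSet_snoc_not_mem {α : Type} [BEq α] [LawfulBEq α] (l : List α) (x : α) (h : x ∉ l) :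
    PySem.Set.ofList (l ++ [x]) = PySem.Set.ofList l ++ [x] := by
  rw [PySem.Set.ofList_append, PySem.Set.update_cons, PySem.Set.update_nil]
  have hne : ¬ x ∈ PySem.Set.ofList l := fun hx => h ((PySem.Set.mem_ofList l x).mp hx)
  simp [PySem.Set.add, PySem.Set.contains, hne]

lemma pvInner_congr (D : List (String × String)) (c c' : String × String → Int) (a : String)
    (h : ∀ p ∈ D, p.1 = a → c p = c' p) : pvInner D c a = pvInner D c' a := by
  simp only [pvInner]
  congr 1
  apply List.map_congr_left
  intro p hp
  have hpD := List.mem_filter.mp hp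
  have : p.1 = a := by simpa using hpD.2
  rw [h p hpD.1 this]

lemma pvInner_snoc_other (D : List (String × String)) (c : String × String → Int) (a : String)
    (q : String × String) (h : q.1 ≠ a) : pvInner (D ++ [q]) c a = pvInner D c a := by
  simp [pvInner, List.filter_append, h]

lemma pvCount_snoc_ne (P : List (String × String)) (p x : String × String) (h : p ≠ x) :
    (P ++ [x]).count p = P.count p := by
  have hx : ¬ (x = p) := fun hx => h hx.symm
  simp [List.count_append, hx]

lemma pvBump_nf (E : List String) (P : List (String × String)) (a b : String) (ha : a ∈ E) :
    pvBump (pvNF E (PySem.Set.ofList P) (fun p => (P.count p : Int))) a b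
      = pvNF E (PySem.Set.ofList (P ++ [(a, b)])) (fun p => ((P ++ [(a, b)]).count p : Int)) := by
  have hgetD := pvNF_getD E (PySem.Set.ofList P) (fun p => (P.count p : Int)) a ha
  by_cases hab : (a, b) ∈ P
  · -- the pair was seen before: its inner entry is overwritten in place
    have habs : (a, b) ∈ PySem.Set.ofList P := (PySem.Set.mem_ofList P (a, b)).mpr hab
    have hcont : (pvInner (PySem.Set.ofList P) (fun p => (P.count p : Int)) a).contains b = true :=
      (pvInner_contains _ _ a b).mpr habs
    have hcnt := pvInner_getD (PySem.Set.ofList P) (fun p => (P.count p : Int)) a b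
      (PySem.Set.nodup_ofList P) habs
    have hsetD := pvSet_snoc_mem P (a, b) hab
    have hinner :
        (pvInner (PySem.Set.ofList P) (fun p => (P.count p : Int)) a).insert b
            ((P.count (a, b) : Int) + 1)
          = pvInner (PySem.Set.ofList P) (fun p => ((P ++ [(a, b)]).count p : Int)) a := by
      apply PySem.Dict.ext
      rw [PySem.Dict.items_insert_of_contains _ _ hcont]
      simp only [pvInner, List.map_map]
      apply List.map_congr_left
      intro p hp
      have hpm := List.mem_filter.mp hp
      have hpa : p.1 = a := by simpa using hpm.2
      by_cases hpb : p.2 = b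
      · have hpe : p = (a, b) := by cases p; simp_all
        subst hpe
        simp [List.count_append]
      · have hpe : p ≠ (a, b) := fun h => hpb (by simp [h])
        simp only [Function.comp_apply, beq_iff_eq, hpb, if_false]
        rw [pvCount_snoc_ne P p (a, b) hpe]
    simp only [pvBump, hgetD, hcont, if_true, hcnt, hinner]
    rw [pvNF_insert E _ _ a ha, hsetD]
    simp only [pvNF]
    congr 1
    apply List.map_congr_left
    intro a' _
    by_cases h : a' = a
    · simp [h]
    · simp only [h, if_false]
      rw [pvInner_congr _ _ (fun p => ((P ++ [(a, b)]).count p : Int)) a'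
        (fun p _ hp1 => (pvCount_snoc_ne P p (a, b)
          (fun he => h (by rw [← hp1, he])) ▸ rfl))]
  · -- a fresh pair: appended at the end of a's inner dict with count 1
    have habs : (a, b) ∉ PySem.Set.ofList P := fun hx => hab ((PySem.Set.mem_ofList P (a, b)).mp hx)
    have hcont : (pvInner (PySem.Set.ofList P) (fun p => (P.count p : Int)) a).contains b = false :=
      Bool.eq_false_iff.mpr (fun h => habs ((pvInner_contains _ _ a b).mp h))
    have hsetD := pvSet_snoc_not_mem P (a, b) hab
    have hinner :
        (pvInner (PySem.Set.ofList P) (fun p => (P.count p : Int)) a).insert b 1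
          = pvInner (PySem.Set.ofList P ++ [(a, b)])
              (fun p => ((P ++ [(a, b)]).count p : Int)) a := by
      apply PySem.Dict.ext
      rw [PySem.Dict.items_insert_of_not_contains _ _ hcont]
      simp only [pvInner, List.filter_append, List.map_append]
      congr 1
      · apply List.map_congr_left
        intro p hp
        have hpP : p ∈ P := (PySem.Set.mem_ofList P p).mp (List.mem_filter.mp hp).1
        have hpe : p ≠ (a, b) := fun h => hab (h ▸ hpP)
        rw [pvCount_snoc_ne P p (a, b) hpe]
      · have hc0 : List.count (a, b) P = 0 := List.count_eq_zero.mpr hab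
        simp [List.count_append, hc0]
    simp only [pvBump, hgetD, hcont, Bool.false_eq_true, if_false, hinner]
    rw [pvNF_insert E _ _ a ha, hsetD]
    simp only [pvNF]
    congr 1
    apply List.map_congr_left
    intro a' _
    by_cases h : a' = a
    · simp [h]
    · simp only [h, if_false]
      rw [pvInner_snoc_other _ _ a' (a, b) (fun he => h (by simp_all))]
      rw [pvInner_congr _ _ (fun p => ((P ++ [(a, b)]).count p : Int)) a'
        (fun p _ hp1 => (pvCount_snoc_ne P p (a, b)
          (fun he => h (by rw [← hp1, he])) ▸ rfl))]

lemma pvLoopA_nf (evs : List String) (E : List String) (P : List (String × String))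
    (hD : ∀ p ∈ P, p.1 ∈ E) :
    pvLoopA (pvNF E (PySem.Set.ofList P) (fun p => (P.count p : Int))) evs
      = pvNF (E ++ evs) (PySem.Set.ofList (P ++ pvPairsOf evs))
          (fun p => ((P ++ pvPairsOf evs).count p : Int)) := by
  induction evs generalizing E P with
  | nil => simp [pvLoopA, pvPairsOf]
  | cons e1 rest ih =>
    cases rest with
    | nil =>
      have h := pvReg_nf E (PySem.Set.ofList P) (fun p => (P.count p : Int)) e1
        (fun p hp => hD p ((PySem.Set.mem_ofList P p).mp hp))
      simp [pvLoopA, pvPairsOf, h]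
    | cons e2 rest' =>
      have hD1 : ∀ p ∈ P, p.1 ∈ E ++ [e1] := fun p hp => List.mem_append_left _ (hD p hp)
      have hreg := pvReg_nf E (PySem.Set.ofList P) (fun p => (P.count p : Int)) e1
        (fun p hp => hD p ((PySem.Set.mem_ofList P p).mp hp))
      by_cases he : e1 = e2
      · subst he
        have hpairs : pvPairsOf (e1 :: e1 :: rest') = pvPairsOf (e1 :: rest') := by
          simp [pvPairsOf]
        simp only [pvLoopA, beq_self_eq_true, if_true, hreg]
        rw [ih (E ++ [e1]) P hD1, hpairs, List.append_assoc]
        rfl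
      · have hpairs : pvPairsOf (e1 :: e2 :: rest') = (e1, e2) :: pvPairsOf (e2 :: rest') := by
          simp [pvPairsOf, he]
        have hbump := pvBump_nf (E ++ [e1]) P e1 e2 (List.mem_append_right _ (List.mem_singleton.mpr rfl))
        have hD2 : ∀ p ∈ P ++ [(e1, e2)], p.1 ∈ E ++ [e1] := by
          intro p hp
          rcases List.mem_append.mp hp with h | h
          · exact hD1 p h
          · rw [List.mem_singleton.mp h]
            exact List.mem_append_right _ (List.mem_singleton.mpr rfl)
        have hne : (e1 == e2) = false := by simp [he]
        simp only [pvLoopA, hne, Bool.false_eq_true, if_false, hreg, hbump]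
        rw [ih (E ++ [e1]) (P ++ [(e1, e2)]) hD2, hpairs, List.append_assoc, List.append_assoc]
        rfl

lemma pvPairsOf_fst_mem (evs : List String) (p : String × String) (h : p ∈ pvPairsOf evs) :
    p.1 ∈ evs := by
  have hz : p ∈ evs.zip evs.tail := List.mem_of_mem_filter h
  cases p with
  | mk a b => exact (List.of_mem_zip hz).1

lemma pvFoldA_nf (L : List (List String)) (E : List String) (P : List (String × String))
    (hD : ∀ p ∈ P, p.1 ∈ E) :
    L.foldl pvLoopA (pvNF E (PySem.Set.ofList P) (fun p => (P.count p : Int)))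
      = pvNF (E ++ L.flatMap (fun evs => evs))
          (PySem.Set.ofList (P ++ L.flatMap pvPairsOf))
          (fun p => ((P ++ L.flatMap pvPairsOf).count p : Int)) := by
  induction L generalizing E P with
  | nil => simp
  | cons evs L ih =>
    simp only [List.foldl_cons, pvLoopA_nf evs E P hD]
    have hD' : ∀ p ∈ P ++ pvPairsOf evs, p.1 ∈ E ++ evs := by
      intro p hp
      rcases List.mem_append.mp hp with h | h
      · exact List.mem_append_left _ (hD p h)
      · exact List.mem_append_right _ (pvPairsOf_fst_mem evs p h)
    rw [ih (E ++ evs) (P ++ pvPairsOf evs) hD']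
    simp [List.append_assoc]

lemma pvDg0_aux (E : List String) (S : PySem.Set String) :
    E.foldl (fun d e => d.insert e PySem.Dict.empty)
        (PySem.Dict.mk (S.map (fun a => (a, (PySem.Dict.empty : PySem.Dict String Int)))))
      = PySem.Dict.mk ((S.update E).map (fun a => (a, PySem.Dict.empty))) := by
  induction E generalizing S with
  | nil => simp [PySem.Set.update_nil]
  | cons e E ih =>
    have hstep : (PySem.Dict.mk (S.map (fun a => (a, (PySem.Dict.empty : PySem.Dict String Int))))).insert e PySem.Dict.empty
        = PySem.Dict.mk ((S.add e).map (fun a => (a, PySem.Dict.empty))) := by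
      by_cases hmem : e ∈ S
      · have hcont : (PySem.Dict.mk (S.map (fun a => (a, (PySem.Dict.empty : PySem.Dict String Int))))).contains e = true := by
          rw [PySem.Dict.contains_mk, List.any_eq_true]
          exact ⟨(e, PySem.Dict.empty), List.mem_map.mpr ⟨e, hmem, rfl⟩, by simp⟩
        apply PySem.Dict.ext
        rw [PySem.Dict.items_insert_of_contains _ _ hcont]
        have hadd : S.add e = S := by
          simp [PySem.Set.add, PySem.Set.contains, hmem]
        rw [hadd, List.map_map]
        apply List.map_congr_left
        intro a _
        by_cases h : a = e <;> simp [h]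
      · have hcont : (PySem.Dict.mk (S.map (fun a => (a, (PySem.Dict.empty : PySem.Dict String Int))))).contains e = false := by
          rw [Bool.eq_false_iff, Ne, PySem.Dict.contains_mk, List.any_eq_true]
          rintro ⟨q, hqm, hq⟩
          obtain ⟨x, hx, rfl⟩ := List.mem_map.mp hqm
          exact hmem ((by simpa using hq : x = e) ▸ hx)
        apply PySem.Dict.ext
        rw [PySem.Dict.items_insert_of_not_contains _ _ hcont]
        have hadd : S.add e = S ++ [e] := by
          simp [PySem.Set.add, PySem.Set.contains, hmem]
        simp [hadd]
    simp only [List.foldl_cons, hstep, ih, PySem.Set.update_cons]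

lemma pvDg0_nf (E : List String) (c : String × String → Int) :
    E.foldl (fun d e => d.insert e PySem.Dict.empty) PySem.Dict.empty = pvNF E [] c := by
  have h0 : (PySem.Dict.empty : PySem.Dict String (PySem.Dict String Int))
      = PySem.Dict.mk (([] : PySem.Set String).map (fun a => (a, PySem.Dict.empty))) := rfl
  rw [h0, pvDg0_aux, PySem.Set.update_nil_left]
  rfl

lemma pvAssemble_nf (E : List String) (c : String × String → Int)
    (D0 Dr : List (String × String)) (hnd : (D0 ++ Dr).Nodup) (hE : ∀ p ∈ Dr, p.1 ∈ E) :
    Dr.foldl (fun dg p => dg.insert p.1 ((dg.getD p.1 PySem.Dict.empty).insert p.2 (c p)))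
        (pvNF E D0 c)
      = pvNF E (D0 ++ Dr) c := by
  induction Dr generalizing D0 with
  | nil => simp
  | cons q Dr ih =>
    obtain ⟨a, b⟩ := q
    have haE : a ∈ E := hE (a, b) List.mem_cons_self
    have hq0 : (a, b) ∉ D0 := by
      intro h
      exact (List.disjoint_of_nodup_append hnd) h List.mem_cons_self
    have hcont : (pvInner D0 c a).contains b = false :=
      Bool.eq_false_iff.mpr (fun h => hq0 ((pvInner_contains D0 c a b).mp h))
    have hinner : (pvInner D0 c a).insert b (c (a, b)) = pvInner (D0 ++ [(a, b)]) c a := by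
      apply PySem.Dict.ext
      rw [PySem.Dict.items_insert_of_not_contains _ _ hcont]
      simp [pvInner, List.filter_append]
    have hstep :
        (pvNF E D0 c).insert a ((pvNF E D0 c).getD a PySem.Dict.empty|>.insert b (c (a, b)))
          = pvNF E (D0 ++ [(a, b)]) c := by
      rw [pvNF_getD E D0 c a haE, hinner, pvNF_insert E D0 c a haE]
      simp only [pvNF]
      congr 1
      apply List.map_congr_left
      intro a' _
      by_cases h : a' = a
      · simp [h]
      · simp only [h, if_false]
        rw [pvInner_snoc_other D0 c a' (a, b) (fun he => h (by simp_all))]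
    have hnd' : (D0 ++ [(a, b)] ++ Dr).Nodup := by
      rw [List.append_assoc]
      simpa using hnd
    have hE' : ∀ p ∈ Dr, p.1 ∈ E := fun p hp => hE p (List.mem_cons_of_mem _ hp)
    simp only [List.foldl_cons, hstep]
    rw [ih (D0 ++ [(a, b)]) hnd' hE', List.append_assoc]
    rfl

-- ===== VERDICT (by name: the statement is the Claim_ definition above) =====
-- every pair recorded for a case list has its source among that case's events
lemma pvFlat_fst_mem (L : List (List String)) (p : String × String)
    (h : p ∈ L.flatMap pvPairsOf) : p.1 ∈ L.flatMap (fun evs => evs) := by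
  obtain ⟨evs, hevs, hp⟩ := List.mem_flatMap.mp h
  exact List.mem_flatMap.mpr ⟨evs, hevs, pvPairsOf_fst_mem evs p hp⟩

-- both sides brought to the common normal form, for one list of per-case event lists
lemma pvMain (L : List (List String)) :
    (L.foldl pvLoopA PySem.Dict.empty).items.map (fun p => (p.1, p.2.items))
      = (((L.flatMap pvPairsOf).foldl
            (fun d p => d.insert p (d.getD p 0 + 1)) PySem.Dict.empty).items.foldl
            (fun dg pc => dg.insert pc.1.1
              ((dg.getD pc.1.1 PySem.Dict.empty).insert pc.1.2 pc.2))
            ((L.flatMap (fun evs => evs)).foldl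
              (fun d e => d.insert e PySem.Dict.empty) PySem.Dict.empty)).items.map
          (fun p => (p.1, p.2.items)) := by
  set P := L.flatMap pvPairsOf with hP
  set flat := L.flatMap (fun evs => evs) with hflat
  rw [PySem.Dict.foldl_insert_getD_add_one_eq_counter, PySem.Dict.items_counter,
    pvDg0_nf flat (fun p => (P.count p : Int)), List.foldl_map]
  have hA := pvFoldA_nf L [] [] (by intro p hp; simp at hp)
  have hstart : (PySem.Dict.empty : PySem.Dict String (PySem.Dict String Int))
      = pvNF [] (PySem.Set.ofList []) (fun p => (([] : List (String × String)).count p : Int)) := rfl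
  rw [hstart, hA]
  simp only [List.nil_append]
  have hB := pvAssemble_nf flat (fun p => (P.count p : Int)) [] (PySem.Set.ofList P)
    (by simp [PySem.Set.nodup_ofList P])
    (fun p hp => pvFlat_fst_mem L p ((PySem.Set.mem_ofList P p).mp hp))
  simp only [List.nil_append] at hB
  rw [← hB]

theorem dependency_graph_inline_spec : Claim_equal_dependency_graph_inline := by
  intro log _
  unfold Spec_dependency_graph_inline dependency_graph_inline dependency_graph_inline_alt
  dsimp only
  have hval : (PySem.Dict.ofList log).values.map (fun v => (PySem.Dict.ofList v).keys)
      = (PySem.Dict.ofList log).keys.map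
          (fun k => (PySem.Dict.ofList ((PySem.Dict.ofList log).getD k [])).keys) := by
    rw [PySem.Dict.values_eq_map_keys (PySem.Dict.ofList log)
      (PySem.Dict.nodup_keys_ofList log) []]
    simp [Function.comp_def]
  rw [hval]
  set L := (PySem.Dict.ofList log).keys.map
    (fun k => (PySem.Dict.ofList ((PySem.Dict.ofList log).getD k [])).keys) with hL
  have hfold : (PySem.Dict.ofList log).keys.foldl
      (fun dg c => pvLoopA dg (PySem.Dict.ofList ((PySem.Dict.ofList log).getD c [])).keys)
      PySem.Dict.empty = L.foldl pvLoopA PySem.Dict.empty := by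
    rw [hL, List.foldl_map]
  rw [hfold]
  have hpairs : (L.flatMap (fun evs => (evs.zip evs.tail).filter (fun p => !(p.1 == p.2))))
      = L.flatMap pvPairsOf := rfl
  rw [hpairs]
  exact pvMain L
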